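-- pv_equiv track=rewrite | github.com/N43527/neuralNetworkPoker | testing_utilities.py | arrayToHandConverter9
-- ===== SOURCE A (Python) =====
-- def arrayToHandConverter9(xArray):
--     myHand = []
--     communityHand = []
--     oppHand = []
--
--     nineInputsReverseNumDict = {1: "2", 2: "3", 3: "4", 4: "5", 5: "6",
--            6: "7", 7: "8", 8: "9", 9: "T", 10: "J", 11: "Q", 12: "K", 13:"A",}
--
--     for i in range(len(xArray)):
--         cardName = nineInputsReverseNumDict[int(xArray[i])]
--         if i < 2:
--             myHand.append(cardName)
--         elif i < 7:
--             communityHand.append(cardName)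
--         else:
--             oppHand.append(cardName)
--
--     return myHand, communityHand, oppHand
-- ===== SOURCE B (Python) =====
-- def arrayToHandConverter9(xArray):
--     nineInputsReverseNumDict = {1: "2", 2: "3", 3: "4", 4: "5", 5: "6",
--            6: "7", 7: "8", 8: "9", 9: "T", 10: "J", 11: "Q", 12: "K", 13: "A"}
--
--     def convert(cards):
--         return [nineInputsReverseNumDict[int(x)] for x in cards]
--
--     return convert(xArray[:2]), convert(xArray[2:7]), convert(xArray[7:])
-- ===== Notes on version B (the rewrite author's own statement) =====
-- stated objective: simpler
-- what changed: Replaces the single indexed loop with per-element if/elif/else dispatch by boundary-based slicing (xArray[:2], xArray[2:7], xArray[7:]) and three short maps, eliminating the index-conditional control flow.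
import Mathlib
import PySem

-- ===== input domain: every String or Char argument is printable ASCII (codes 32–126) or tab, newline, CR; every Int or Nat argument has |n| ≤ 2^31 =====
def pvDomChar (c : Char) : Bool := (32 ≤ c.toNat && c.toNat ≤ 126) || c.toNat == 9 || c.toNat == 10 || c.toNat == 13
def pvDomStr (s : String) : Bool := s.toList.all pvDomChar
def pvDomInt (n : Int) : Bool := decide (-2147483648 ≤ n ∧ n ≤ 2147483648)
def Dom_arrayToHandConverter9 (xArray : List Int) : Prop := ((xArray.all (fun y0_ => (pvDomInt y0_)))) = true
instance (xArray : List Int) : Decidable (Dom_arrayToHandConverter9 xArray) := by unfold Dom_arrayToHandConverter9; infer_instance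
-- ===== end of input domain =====

-- B replaces A's indexed loop with per-element if/elif/else dispatch by boundary slicing
-- (xArray[:2], xArray[2:7], xArray[7:]) and three maps: simpler, no index-conditional control flow.


-- ===== PORT A =====
-- nineInputsReverseNumDict (A's local dict; dict lookup raises KeyError outside keys 1..13,
-- excluded by Pre_; the port returns "" there, unreachable under Pre_)
def pvDictA : PySem.Dict Int String :=
  PySem.Dict.ofList [(1, "2"), (2, "3"), (3, "4"), (4, "5"), (5, "6"),
    (6, "7"), (7, "8"), (8, "9"), (9, "T"), (10, "J"), (11, "Q"), (12, "K"), (13, "A")]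

def arrayToHandConverter9 (xArray : List Int) : List String × List String × List String :=
  (PySem.List.pyRange 0 (xArray.length : Int) 1).foldl
    (fun (st : List String × List String × List String) i =>
      let cardName := pvDictA.getD (PySem.List.pyGetD xArray i 0) ""
      if i < 2 then (st.1 ++ [cardName], st.2.1, st.2.2)
      else if i < 7 then (st.1, st.2.1 ++ [cardName], st.2.2)
      else (st.1, st.2.1, st.2.2 ++ [cardName]))
    ([], [], [])

-- ===== PORT B =====
def pvDictB : PySem.Dict Int String :=
  PySem.Dict.ofList [(1, "2"), (2, "3"), (3, "4"), (4, "5"), (5, "6"),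
    (6, "7"), (7, "8"), (8, "9"), (9, "T"), (10, "J"), (11, "Q"), (12, "K"), (13, "A")]

def pvConvert (cards : List Int) : List String :=
  cards.map (fun x => pvDictB.getD x "")

def arrayToHandConverter9_alt (xArray : List Int) : List String × List String × List String :=
  (pvConvert (PySem.List.slice xArray none (some 2)),
   pvConvert (PySem.List.slice xArray (some 2) (some 7)),
   pvConvert (PySem.List.slice xArray (some 7) none))

-- ===== PRECONDITION & SPEC =====
-- Pre_ excludes exactly the inputs on which A raises KeyError: an element outside keys 1..13.
def Pre_arrayToHandConverter9 (xArray : List Int) : Prop :=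
  ∀ x ∈ xArray, 1 ≤ x ∧ x ≤ 13

instance (xArray : List Int) : Decidable (Pre_arrayToHandConverter9 xArray) := by
  unfold Pre_arrayToHandConverter9; infer_instance

def pvWitness_arrayToHandConverter9 : List Int := [1, 13, 5, 6, 7, 8, 9, 10, 11]

def Spec_arrayToHandConverter9 (xArray : List Int) (out : List String × List String × List String) : Prop := out = arrayToHandConverter9_alt xArray
instance (xArray : List Int) (out : List String × List String × List String) : Decidable (Spec_arrayToHandConverter9 xArray out) := by unfold Spec_arrayToHandConverter9; infer_instance

-- ===== CLAIM (what is proved, stated in full; the proofs are below) =====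
def Claim_equal_arrayToHandConverter9 : Prop := ∀ (xArray : List Int), Dom_arrayToHandConverter9 xArray → Pre_arrayToHandConverter9 xArray → Spec_arrayToHandConverter9 xArray (arrayToHandConverter9 xArray)

-- ===== LEMMAS AND PROOFS =====

-- the per-element card-name map, shared shape of both sides' bodies
def pvG (x : Int) : String := pvDictA.getD x ""

-- A's loop body restated on (index, value) pairs
def pvStep (st : List String × List String × List String) (p : Int × Int) :
    List String × List String × List String :=
  let cardName := pvG p.2
  if p.1 < 2 then (st.1 ++ [cardName], st.2.1, st.2.2)
  else if p.1 < 7 then (st.1, st.2.1 ++ [cardName], st.2.2)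
  else (st.1, st.2.1, st.2.2 ++ [cardName])

lemma pvLoop (xs : List Int) : ∀ (s : ℕ) (a b c : List String),
    (PySem.List.enumerate xs (s : Int)).foldl pvStep (a, b, c) =
      (a ++ (xs.take (2 - s)).map pvG,
       b ++ ((xs.drop (2 - s)).take ((7 - s) - (2 - s))).map pvG,
       c ++ (xs.drop (7 - s)).map pvG) := by
  induction xs with
  | nil => intro s a b c; simp [PySem.List.enumerate_nil]
  | cons x rest ih =>
    intro s a b c
    rw [PySem.List.enumerate_cons]
    have hc : ((s : Int) + 1) = ((s + 1 : ℕ) : Int) := by push_cast; ring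
    rw [List.foldl_cons, hc]
    by_cases h2 : s < 2
    · have hstep : pvStep (a, b, c) ((s : Int), x) = (a ++ [pvG x], b, c) := by
        simp only [pvStep]
        rw [if_pos (by exact_mod_cast h2)]
      rw [hstep, ih (s + 1)]
      have e1 : 2 - s = (2 - (s + 1)) + 1 := by omega
      have e2 : 7 - s = (7 - (s + 1)) + 1 := by omega
      rw [e1, e2]
      simp [List.take_succ_cons, List.drop_succ_cons]
    · by_cases h7 : s < 7
      · have hstep : pvStep (a, b, c) ((s : Int), x) = (a, b ++ [pvG x], c) := by
          simp only [pvStep]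
          rw [if_neg (by exact_mod_cast h2), if_pos (by exact_mod_cast h7)]
        rw [hstep, ih (s + 1)]
        have e1 : 2 - s = 0 := by omega
        have e1' : 2 - (s + 1) = 0 := by omega
        have e2 : 7 - s = (7 - (s + 1)) + 1 := by omega
        rw [e1, e1', e2]
        simp [List.take_succ_cons, List.drop_succ_cons]
      · have hstep : pvStep (a, b, c) ((s : Int), x) = (a, b, c ++ [pvG x]) := by
          simp only [pvStep]
          rw [if_neg (by exact_mod_cast h2), if_neg (by exact_mod_cast h7)]
        rw [hstep, ih (s + 1)]
        have e1 : 2 - s = 0 := by omega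
        have e1' : 2 - (s + 1) = 0 := by omega
        have e2 : 7 - s = 0 := by omega
        have e2' : 7 - (s + 1) = 0 := by omega
        rw [e1, e1', e2, e2']
        simp

lemma pvA_eq (xs : List Int) :
    arrayToHandConverter9 xs =
      ((xs.take 2).map pvG, ((xs.drop 2).take 5).map pvG, (xs.drop 7).map pvG) := by
  unfold arrayToHandConverter9
  have hmap := PySem.List.enumerate_eq_map_pyRange (xs := xs) (d := (0 : Int))
  simp only [PySem.List.len_eq] at hmap
  have : (PySem.List.pyRange 0 (xs.length : Int) 1).foldl
      (fun st i => pvStep st (i, PySem.List.pyGetD xs i 0)) ([], [], []) =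
      (PySem.List.enumerate xs (0 : Int)).foldl pvStep ([], [], []) := by
    rw [hmap, List.foldl_map]
  simp only [pvStep, pvG] at this
  rw [this]
  have h0 := pvLoop xs 0 [] [] []
  simp only [Nat.cast_zero] at h0
  rw [h0]
  norm_num

lemma pvB_eq (xs : List Int) :
    arrayToHandConverter9_alt xs =
      ((xs.take 2).map pvG, ((xs.drop 2).take 5).map pvG, (xs.drop 7).map pvG) := by
  unfold arrayToHandConverter9_alt pvConvert
  have hd : pvDictB = pvDictA := rfl
  simp [pysem, hd]
  exact ⟨rfl, rfl, rfl⟩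

-- ===== VERDICT (by name: the statement is the Claim_ definition above) =====
theorem arrayToHandConverter9_spec : Claim_equal_arrayToHandConverter9 := by
  intro xs _ _
  unfold Spec_arrayToHandConverter9
  rw [pvA_eq, pvB_eq]
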